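-- pv_equiv track=rewrite | github.com/tanndlin/Aoc24 | 7/7.py | canBeSolved
-- ===== SOURCE A (Python) =====
-- def canBeSolved(target, curValue, values, depth):
--     if curValue > target:
--         return False
--
--     if depth == len(values):
--         return curValue == target
--
--     # Try adding
--     if canBeSolved(target, curValue + values[depth], values, depth + 1):
--         return True
--
--     # Try multiplying
--     if canBeSolved(target, curValue * values[depth], values, depth + 1):
--         return True
--
--     # Try concat
--     if canBeSolved(target, int(str(curValue) + str(values[depth])), values, depth + 1):
--         return True
--
--     return False
-- ===== SOURCE B (Python) =====
-- def canBeSolved(target, curValue, values, depth):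
--     # Level-by-level breadth-first sweep with a deduplicating set instead of
--     # A's depth-first 3-way recursion; only values <= target are expanded.
--     reachable = {curValue}
--     for v in values[depth:]:
--         nxt = set()
--         for t in reachable:
--             if t <= target:
--                 nxt.add(t + v)
--                 nxt.add(t * v)
--                 nxt.add(int(str(t) + str(v)))
--         reachable = nxt
--     return target in reachable
-- ===== Notes on version B (the rewrite author's own statement) =====
-- stated objective: alternative
-- what changed: Replaces A's depth-first 3-way recursion by an iterative breadth-first sweep over the suffix that keeps one deduplicated set of reachable values per level, so repeated intermediate values are explored once instead of once per path.
-- outside the precondition, e.g. on canBeSolved(5, 3, [2], -1): A returns False, B returns True; on canBeSolved(10, 5, [20, -1], 0): A returns False, B returns False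
import Mathlib
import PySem

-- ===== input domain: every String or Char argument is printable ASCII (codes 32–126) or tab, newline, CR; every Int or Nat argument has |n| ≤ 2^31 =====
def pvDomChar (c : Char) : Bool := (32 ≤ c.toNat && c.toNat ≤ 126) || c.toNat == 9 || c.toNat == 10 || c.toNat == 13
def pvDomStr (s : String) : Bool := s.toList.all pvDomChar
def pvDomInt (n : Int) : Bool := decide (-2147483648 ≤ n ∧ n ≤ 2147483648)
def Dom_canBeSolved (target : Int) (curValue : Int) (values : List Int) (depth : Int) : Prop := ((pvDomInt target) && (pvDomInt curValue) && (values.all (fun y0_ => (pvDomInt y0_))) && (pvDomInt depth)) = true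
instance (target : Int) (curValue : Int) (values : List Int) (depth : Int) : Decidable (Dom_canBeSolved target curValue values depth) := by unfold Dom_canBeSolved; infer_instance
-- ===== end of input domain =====

-- B replaces A's depth-first 3-way recursion by an iterative breadth-first sweep keeping
-- a deduplicated set of reachable values per level (objective: alternative).

-- int(str(a) + str(b)) — the concat operator both Pythons use; exact via PySem;
-- the `getD 0` default is only reached where Python raises ValueError (excluded by Pre_).
def pyIntConcat (a b : Int) : Int :=
  (PySem.Int.ofChars? (PySem.Int.toChars a ++ PySem.Int.toChars b)).getD 0

-- ===== PORT A =====
def canBeSolved (target : Int) (curValue : Int) (values : List Int) (depth : Int) : Bool :=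
  if curValue > target then false
  else if depth = (values.length : Int) then decide (curValue = target)
  else
    match h : PySem.List.pyGet? values depth with
    | none => false   -- IndexError in Python; excluded by Pre_
    | some v =>
      canBeSolved target (curValue + v) values (depth + 1) ||
      (canBeSolved target (curValue * v) values (depth + 1) ||
       canBeSolved target (pyIntConcat curValue v) values (depth + 1))
termination_by ((values.length : Int) - depth).toNat
decreasing_by
  all_goals
    have hin : PySem.Raise.InRange values.length depth := by
      by_contra hc
      rw [← PySem.List.pyGet?_eq_none_iff] at hc
      simp [hc] at h
    unfold PySem.Raise.InRange at hin
    omega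

-- ===== PORT B =====
-- one level of the sweep: expand every reachable value ≤ target by the three ops
def levelStep (target : Int) (v : Int) (S : PySem.Set Int) : PySem.Set Int :=
  S.foldl (fun N t =>
    if t ≤ target then
      PySem.Set.add (PySem.Set.add (PySem.Set.add N (t + v)) (t * v)) (pyIntConcat t v)
    else N) PySem.Set.empty

def canBeSolved_alt (target : Int) (curValue : Int) (values : List Int) (depth : Int) : Bool :=
  let rest := PySem.List.slice values (some depth) none
  let final := rest.foldl (fun S v => levelStep target v S)
                 (PySem.Set.add PySem.Set.empty curValue)
  final.contains target

-- ===== PRECONDITION & SPEC =====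
-- Pre_ excludes inputs where Python A raises (depth out of range reached with
-- curValue ≤ target: IndexError; a reachable negative values[i] fed to
-- int(str(curValue)+str(values[i])): ValueError) and, conservatively, two kinds of
-- inputs A still returns on: negative depth, where A's values[depth] wraps around and
-- revisits elements (accidental negative-index wraparound), and suffixes containing a
-- negative element that the curValue>target pruning happens never to reach.
def Pre_canBeSolved (target : Int) (curValue : Int) (values : List Int) (depth : Int) : Prop :=
  target < curValue ∨
    (0 ≤ depth ∧ depth ≤ (values.length : Int) ∧
      ∀ v ∈ values.drop depth.toNat, 0 ≤ v)
instance (target : Int) (curValue : Int) (values : List Int) (depth : Int) : Decidable (Pre_canBeSolved target curValue values depth) := by unfold Pre_canBeSolved; infer_instance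

def pvWitness_canBeSolved : Int × Int × List Int × Int := (29, 1, [2, 9], 0)

def Spec_canBeSolved (target : Int) (curValue : Int) (values : List Int) (depth : Int) (out : Bool) : Prop := out = canBeSolved_alt target curValue values depth
instance (target : Int) (curValue : Int) (values : List Int) (depth : Int) (out : Bool) : Decidable (Spec_canBeSolved target curValue values depth out) := by unfold Spec_canBeSolved; infer_instance

-- ===== CLAIM (what is proved, stated in full; the proofs are below) =====
def Claim_equal_canBeSolved : Prop := ∀ (target : Int) (curValue : Int) (values : List Int) (depth : Int), Dom_canBeSolved target curValue values depth → Pre_canBeSolved target curValue values depth → Spec_canBeSolved target curValue values depth (canBeSolved target curValue values depth)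

-- ===== LEMMAS AND PROOFS =====

-- reference recursion over the remaining suffix (proof device, not a port)
def run (target t : Int) : List Int → Bool
  | [] => decide (t = target)
  | v :: l =>
    if t > target then false
    else run target (t + v) l || (run target (t * v) l || run target (pyIntConcat t v) l)

-- membership through the inner fold of one level
lemma mem_foldl_add (target v x : Int) :
    ∀ (L : List Int) (N : PySem.Set Int),
      x ∈ L.foldl (fun N t =>
        if t ≤ target then
          PySem.Set.add (PySem.Set.add (PySem.Set.add N (t + v)) (t * v)) (pyIntConcat t v)
        else N) N ↔
        x ∈ N ∨ ∃ t ∈ L, t ≤ target ∧ (x = t + v ∨ x = t * v ∨ x = pyIntConcat t v) := by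
  intro L
  induction L with
  | nil => simp
  | cons a L ih =>
    intro N
    simp only [List.foldl_cons, ih]
    by_cases ha : a ≤ target
    · simp only [if_pos ha, PySem.Set.mem_add, List.mem_cons]
      constructor
      · rintro ((((h|h)|h)|h)|⟨t,ht,h1,h2⟩)
        · exact Or.inl h
        · exact Or.inr ⟨a, Or.inl rfl, ha, Or.inl h⟩
        · exact Or.inr ⟨a, Or.inl rfl, ha, Or.inr (Or.inl h)⟩
        · exact Or.inr ⟨a, Or.inl rfl, ha, Or.inr (Or.inr h)⟩
        · exact Or.inr ⟨t, Or.inr ht, h1, h2⟩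
      · rintro (h|⟨t,(rfl|ht),h1,h2⟩)
        · exact Or.inl (Or.inl (Or.inl (Or.inl h)))
        · rcases h2 with h|h|h
          · exact Or.inl (Or.inl (Or.inl (Or.inr h)))
          · exact Or.inl (Or.inl (Or.inr h))
          · exact Or.inl (Or.inr h)
        · exact Or.inr ⟨t, ht, h1, h2⟩
    · simp only [if_neg ha, List.mem_cons]
      constructor
      · rintro (h|⟨t,ht,h1,h2⟩)
        · exact Or.inl h
        · exact Or.inr ⟨t, Or.inr ht, h1, h2⟩
      · rintro (h|⟨t,(rfl|ht),h1,h2⟩)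
        · exact Or.inl h
        · exact absurd h1 ha
        · exact Or.inr ⟨t, ht, h1, h2⟩

lemma mem_levelStep (target v x : Int) (S : PySem.Set Int) :
    x ∈ levelStep target v S ↔
      ∃ t ∈ S, t ≤ target ∧ (x = t + v ∨ x = t * v ∨ x = pyIntConcat t v) := by
  unfold levelStep
  rw [mem_foldl_add]
  simp [PySem.Set.empty]

-- the sweep decides `run`: target is in the final set iff some start value succeeds
lemma mem_foldl_levelStep (target : Int) :
    ∀ (l : List Int) (S : PySem.Set Int),
      (target ∈ l.foldl (fun S v => levelStep target v S) S) ↔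
        ∃ t ∈ S, run target t l = true := by
  intro l
  induction l with
  | nil =>
    intro S
    simp only [List.foldl_nil, run]
    constructor
    · intro h; exact ⟨target, h, by simp⟩
    · rintro ⟨t, ht, h⟩; simp at h; subst h; exact ht
  | cons v l ih =>
    intro S
    simp only [List.foldl_cons, ih]
    constructor
    · rintro ⟨t', ht', hrun⟩
      rcases (mem_levelStep target v t' S).1 ht' with ⟨t, ht, hle, hcase⟩
      refine ⟨t, ht, ?_⟩
      simp only [run, if_neg (not_lt.2 hle), Bool.or_eq_true]
      rcases hcase with rfl|rfl|rfl
      · exact Or.inl hrun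
      · exact Or.inr (Or.inl hrun)
      · exact Or.inr (Or.inr hrun)
    · rintro ⟨t, ht, hrun⟩
      simp only [run] at hrun
      by_cases hle : t ≤ target
      · rw [if_neg (not_lt.2 hle)] at hrun
        simp only [Bool.or_eq_true] at hrun
        rcases hrun with h|h|h
        · exact ⟨t + v, (mem_levelStep target v _ S).2 ⟨t, ht, hle, Or.inl rfl⟩, h⟩
        · exact ⟨t * v, (mem_levelStep target v _ S).2 ⟨t, ht, hle, Or.inr (Or.inl rfl)⟩, h⟩
        · exact ⟨pyIntConcat t v, (mem_levelStep target v _ S).2 ⟨t, ht, hle, Or.inr (Or.inr rfl)⟩, h⟩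
      · rw [if_pos (lt_of_not_ge hle)] at hrun
        exact absurd hrun (by simp)

-- A computes `run` on the suffix values[depth:]
lemma canBeSolved_eq_run (target : Int) (values : List Int) :
    ∀ (l : List Int) (c d : Int), 0 ≤ d → d ≤ (values.length : Int) →
      values.drop d.toNat = l →
      canBeSolved target c values d = run target c l := by
  intro l
  induction l with
  | nil =>
    intro c d hd0 hdle hdrop
    have hlen : values.length ≤ d.toNat := by
      by_contra hc
      have := List.drop_eq_nil_iff.1 hdrop
      omega
    have hd : d = (values.length : Int) := by omega
    rw [canBeSolved, run]
    by_cases hc : c > target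
    · rw [if_pos hc]
      have : ¬ c = target := by omega
      simp [this]
    · rw [if_neg hc, if_pos hd]
  | cons v l ih =>
    intro c d hd0 hdle hdrop
    have hlt : d.toNat < values.length := by
      by_contra hc
      rw [List.drop_eq_nil_of_le (by omega)] at hdrop
      simp at hdrop
    have hv : values[d.toNat]? = some v := by
      have : (values.drop d.toNat)[0]? = values[d.toNat + 0]? := List.getElem?_drop
      rw [hdrop] at this
      simpa using this.symm
    have hpg : PySem.List.pyGet? values d = some v := by
      rw [PySem.List.pyGet?_of_nonneg values hd0, hv]
    have hdrop' : values.drop (d + 1).toNat = l := by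
      have h1 : (d + 1).toNat = d.toNat + 1 := by omega
      rw [h1, ← List.drop_drop, hdrop]
      simp
    have hne : ¬ d = (values.length : Int) := by omega
    rw [canBeSolved, run]
    by_cases hc : c > target
    · rw [if_pos hc, if_pos hc]
    · rw [if_neg hc, if_neg hc, if_neg hne]
      have h1 := ih (c + v) (d + 1) (by omega) (by omega) hdrop'
      have h2 := ih (c * v) (d + 1) (by omega) (by omega) hdrop'
      have h3 := ih (pyIntConcat c v) (d + 1) (by omega) (by omega) hdrop'
      rw [show PySem.List.pyGet? values d = some v from hpg]
      simp only [h1, h2, h3]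

-- B computes `run` on the suffix values[depth:]
lemma alt_eq_run (target c : Int) (values : List Int) (depth : Int) {l : List Int}
    (hl : PySem.List.slice values (some depth) none = l) :
    canBeSolved_alt target c values depth = run target c l := by
  unfold canBeSolved_alt
  rw [hl, PySem.Set.contains_eq_decide]
  have hmem := mem_foldl_levelStep target l (PySem.Set.add PySem.Set.empty c)
  have hS : ∀ t : Int, t ∈ PySem.Set.add PySem.Set.empty c ↔ t = c := by
    intro t
    rw [PySem.Set.mem_add]
    simp [PySem.Set.empty]
  cases hrun : run target c l with
  | true =>
    simp only [decide_eq_true_eq]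
    exact hmem.2 ⟨c, (hS c).2 rfl, hrun⟩
  | false =>
    simp only [decide_eq_false_iff_not]
    intro hmm
    rcases hmem.1 hmm with ⟨t, ht, h⟩
    rw [hS t] at ht
    subst ht
    rw [hrun] at h
    exact Bool.noConfusion h

lemma run_of_gt (target c : Int) (l : List Int) (h : target < c) :
    run target c l = false := by
  cases l with
  | nil => simp [run]; omega
  | cons v l => rw [run, if_pos (by omega)]

-- ===== VERDICT (by name: the statement is the Claim_ definition above) =====
theorem canBeSolved_spec : Claim_equal_canBeSolved := by
  intro target c values depth _ hpre
  unfold Spec_canBeSolved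
  rcases hpre with hgt | ⟨hd0, hdle, _⟩
  · rw [alt_eq_run target c values depth rfl,
        run_of_gt target c _ hgt, canBeSolved, if_pos (by omega)]
  · have hcast : ((depth.toNat : Nat) : Int) = depth := by omega
    have hslice : PySem.List.slice values (some depth) none = values.drop depth.toNat := by
      conv_lhs => rw [← hcast]
      exact PySem.List.slice_from_natCast values depth.toNat
    rw [alt_eq_run target c values depth hslice]
    exact canBeSolved_eq_run target values _ c depth hd0 hdle rfl
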